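-- pv_equiv track=rewrite | github.com/MunMaks/GECC-2024 | Challenge_5/fivth.py | remplissages_possibles
-- ===== SOURCE A (Python) =====
-- def remplissages_possibles(produits: list[tuple], capacite_sac: int) -> list[list[str]]:
--     """
--         Renvoie une liste de tous les remplissages possibles
--         du sac à dos avec les produits disponibles.
--     """
--     n = len(produits)
--     res = []
--
--     # tous les remplissages possibles
--     def backtrack(index: int, current_weight: int, current_items: list) -> None:
--         """
--             Backtracking fonction
--         """
--         if current_weight <= capacite_sac:
--             res.append(current_items[:])
--
--         for i in range(index, n):
--
--             current_items.append(produits[i][0])    # ajouter le produit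
--             current_weight += produits[i][1]        # ajouter son poids
--
--             backtrack(i + 1, current_weight, current_items) # le produit suivant
--
--             # retirer le produit et son poids
--             # pour essayer d'autres combinaisons
--             current_items.pop()
--             current_weight -= produits[i][1]
--
--     backtrack(0, 0, [])
--     return res
-- ===== SOURCE B (Python) =====
-- def remplissages_possibles(produits: list[tuple], capacite_sac: int) -> list[list[str]]:
--     """Iterative DFS with an explicit stack of (remaining products, weight, items) frames."""
--     res = []
--     stack = [(produits, 0, [])]
--     while stack:
--         rest, weight, items = stack.pop()
--         if weight <= capacite_sac:
--             res.append(items)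
--         for i in range(len(rest) - 1, -1, -1):
--             nom, poids = rest[i]
--             stack.append((rest[i + 1:], weight + poids, items + [nom]))
--     return res
-- ===== Notes on version B (the rewrite author's own statement) =====
-- stated objective: alternative
-- what changed: Replaced A's recursive backtracking with shared-list mutation (append/recurse/pop) by an iterative DFS over an explicit stack of (remaining-products, weight, items) frames, pushing children in reverse order to reproduce the same pre-order output.
import Mathlib
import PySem

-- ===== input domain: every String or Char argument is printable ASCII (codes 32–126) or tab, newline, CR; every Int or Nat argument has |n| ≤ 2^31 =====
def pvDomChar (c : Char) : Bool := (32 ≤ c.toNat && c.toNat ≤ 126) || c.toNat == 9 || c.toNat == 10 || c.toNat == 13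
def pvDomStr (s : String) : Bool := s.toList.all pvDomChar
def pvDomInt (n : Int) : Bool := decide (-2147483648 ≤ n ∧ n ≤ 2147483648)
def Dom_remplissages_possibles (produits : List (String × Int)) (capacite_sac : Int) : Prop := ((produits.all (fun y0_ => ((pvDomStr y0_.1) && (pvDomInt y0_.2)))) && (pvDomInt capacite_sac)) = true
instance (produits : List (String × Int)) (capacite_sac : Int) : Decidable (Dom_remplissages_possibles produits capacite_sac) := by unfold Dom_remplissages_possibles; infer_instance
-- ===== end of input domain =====

-- B replaces A's recursive backtracking by an iterative DFS over an explicit stack of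
-- (remaining products, weight, items) frames: same output values and order (objective: alternative).

-- ===== PORT A =====
-- A's `backtrack(index, cw, ci)`: the index into `produits` is ported as the suffix
-- `produits.drop index`; the `for i in range(index, n)` loop is `pvBtLoopA` over that suffix,
-- and the append/recurse/pop cycle becomes the functional `ci ++ [nom]` per iteration.
mutual
def pvBtA (cap : Int) : List (String × Int) → Int → List String → List (List String)
  | rest, cw, ci => (if cw ≤ cap then [ci] else []) ++ pvBtLoopA cap rest cw ci
  termination_by rest _ _ => (rest.length, 1)
def pvBtLoopA (cap : Int) : List (String × Int) → Int → List String → List (List String)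
  | [], _, _ => []
  | (nom, poids) :: tl, cw, ci =>
      pvBtA cap tl (cw + poids) (ci ++ [nom]) ++ pvBtLoopA cap tl cw ci
  termination_by rest _ _ => (rest.length, 0)
end

def remplissages_possibles (produits : List (String × Int)) (capacite_sac : Int) : List (List String) :=
  pvBtA capacite_sac produits 0 []

-- ===== PORT B =====
-- B's `for i in range(len(rest)-1, -1, -1): stack.append(...)` pushes child frames in
-- descending i order, so the resulting stack has the ascending-i children on top:
-- pvChildrenB builds that ascending-i child list, prepended to the stack in pvLoopB.
def pvChildrenB : List (String × Int) → Int → List String → List (List (String × Int) × Int × List String)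
  | [], _, _ => []
  | (nom, poids) :: tl, w, items => (tl, w + poids, items ++ [nom]) :: pvChildrenB tl w items

-- measure of the child frames, used for pvLoopB's termination
theorem pvChildrenB_measure (rest : List (String × Int)) (w : Int) (items : List String) :
    ((pvChildrenB rest w items).map (fun f => 2 ^ f.1.length)).sum = 2 ^ rest.length - 1 := by
  induction rest generalizing w items with
  | nil => simp [pvChildrenB]
  | cons a tl ih =>
      have h : 0 < 2 ^ tl.length := Nat.two_pow_pos _
      simp [pvChildrenB, ih, List.length_cons, pow_succ]
      omega

def pvLoopB (cap : Int) : List (List (String × Int) × Int × List String) → List (List String) → List (List String)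
  | [], res => res
  | (rest, w, items) :: st, res =>
      pvLoopB cap (pvChildrenB rest w items ++ st) (res ++ (if w ≤ cap then [items] else []))
termination_by st _ => (st.map (fun f => 2 ^ f.1.length)).sum
decreasing_by
  have h := pvChildrenB_measure rest w items
  have h2 : 0 < 2 ^ rest.length := Nat.two_pow_pos _
  simp only [List.map_append, List.sum_append, List.map_cons, List.sum_cons, h]
  omega

def remplissages_possibles_alt (produits : List (String × Int)) (capacite_sac : Int) : List (List String) :=
  pvLoopB capacite_sac [(produits, 0, [])] []

-- ===== PRECONDITION & SPEC =====
def Spec_remplissages_possibles (produits : List (String × Int)) (capacite_sac : Int) (out : List (List String)) : Prop := out = remplissages_possibles_alt produits capacite_sac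
instance (produits : List (String × Int)) (capacite_sac : Int) (out : List (List String)) : Decidable (Spec_remplissages_possibles produits capacite_sac out) := by unfold Spec_remplissages_possibles; infer_instance

-- ===== CLAIM (what is proved, stated in full; the proofs are below) =====
def Claim_equal_remplissages_possibles : Prop := ∀ (produits : List (String × Int)) (capacite_sac : Int), Dom_remplissages_possibles produits capacite_sac → Spec_remplissages_possibles produits capacite_sac (remplissages_possibles produits capacite_sac)

-- ===== LEMMAS AND PROOFS =====

-- A's inner loop produces exactly the concatenation of the subtrees of B's child frames.
theorem pvBtLoopA_eq_children (cap : Int) (rest : List (String × Int)) (w : Int) (items : List String) :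
    pvBtLoopA cap rest w items
      = ((pvChildrenB rest w items).map (fun f => pvBtA cap f.1 f.2.1 f.2.2)).flatten := by
  induction rest generalizing w items with
  | nil => simp [pvBtLoopA, pvChildrenB]
  | cons a tl ih =>
      obtain ⟨nom, poids⟩ := a
      simp [pvBtLoopA, pvChildrenB, ih]

-- B's stack loop equals the accumulator followed by the A-subtrees of the stacked frames.
theorem pvLoopB_eq (cap : Int) (st : List (List (String × Int) × Int × List String))
    (res : List (List String)) :
    pvLoopB cap st res = res ++ (st.map (fun f => pvBtA cap f.1 f.2.1 f.2.2)).flatten := by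
  fun_induction pvLoopB cap st res with
  | case1 res => simp
  | case2 rest w items st res ih =>
      simp only [dite_eq_ite] at ih
      rw [ih]
      have hsub : pvBtA cap rest w items
          = (if w ≤ cap then [items] else [])
            ++ ((pvChildrenB rest w items).map (fun f => pvBtA cap f.1 f.2.1 f.2.2)).flatten := by
        rw [pvBtA, pvBtLoopA_eq_children]
      simp only [List.map_cons, List.flatten_cons, List.map_append, List.flatten_append, hsub,
        List.append_assoc]

-- ===== VERDICT (by name: the statement is the Claim_ definition above) =====
theorem remplissages_possibles_spec : Claim_equal_remplissages_possibles := by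
  intro produits cap _
  unfold Spec_remplissages_possibles remplissages_possibles remplissages_possibles_alt
  rw [pvLoopB_eq]
  simp
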